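-- pv_equiv track=rewrite | github.com/Maharshi-Pandya/YuE-optim | src/yue/infer_all.py | split_bsz
-- ===== SOURCE A (Python) =====
-- def split_bsz(bsz, maxbsz):
--     if bsz <= maxbsz:
--         return [(0, bsz)]
--     if bsz % maxbsz == 0:
--         return [(i, i + maxbsz) for i in range(0, bsz, maxbsz)]
--
--     n_sub_batches = (bsz + maxbsz - 1) // maxbsz  # ceiling division
--
--     indices = []
--     remaining = bsz
--     start = 0
--
--     for i in range(n_sub_batches):
--         size = (remaining + n_sub_batches - i - 1) // (n_sub_batches - i)
--         end = start + size
--         indices.append((start, end))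
--         start = end
--         remaining -= size
--
--     return indices
-- ===== SOURCE B (Python) =====
-- def split_bsz(bsz, maxbsz):
--     if bsz <= maxbsz:
--         return [(0, bsz)]
--     n = (bsz + maxbsz - 1) // maxbsz
--     base, rem = divmod(bsz, n)
--     bounds = [i * base + min(i, rem) for i in range(n + 1)]
--     return list(zip(bounds, bounds[1:]))
-- ===== Notes on version B (the rewrite author's own statement) =====
-- stated objective: simpler
-- what changed: B replaces A's three-branch loop with a remaining-accumulator and per-iteration ceiling division by two staged passes: a comprehension of closed-form boundaries i*base+min(i,rem) from one divmod, then zip of adjacent boundaries; A's divisible-case branch disappears.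
-- outside the precondition, e.g. on split_bsz(5, 0): A raises ZeroDivisionError, B raises ZeroDivisionError; on split_bsz(0, -3): A returns [], B returns [(0, 0)]; on split_bsz(5, -2): A returns [], B returns []
import Mathlib
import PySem

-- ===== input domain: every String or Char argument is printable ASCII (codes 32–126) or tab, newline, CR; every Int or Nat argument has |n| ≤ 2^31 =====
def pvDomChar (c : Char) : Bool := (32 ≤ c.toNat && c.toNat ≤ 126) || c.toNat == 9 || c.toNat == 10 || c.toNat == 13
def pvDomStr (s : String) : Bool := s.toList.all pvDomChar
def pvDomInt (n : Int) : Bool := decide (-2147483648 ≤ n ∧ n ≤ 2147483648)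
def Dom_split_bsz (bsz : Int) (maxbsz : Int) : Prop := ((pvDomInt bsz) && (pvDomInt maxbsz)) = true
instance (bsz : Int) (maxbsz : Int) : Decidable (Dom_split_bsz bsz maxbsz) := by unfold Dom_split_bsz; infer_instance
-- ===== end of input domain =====

-- B replaces A's remaining-accumulator loop (a ceiling division per iteration, plus a separate
-- divisible-case branch) by two staged passes: closed-form boundaries from one divmod, then zip — simpler.

-- ===== PORT A =====
-- loop body of A's third branch: state = (indices, remaining, start)
def splitLoopA (n : Int) (st : List (Int × Int) × Int × Int) (i : Int) :
    List (Int × Int) × Int × Int :=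
  let size := PySem.Int.floordiv (st.2.1 + n - i - 1) (n - i)
  let e := st.2.2 + size
  (st.1 ++ [(st.2.2, e)], st.2.1 - size, e)

def split_bsz (bsz : Int) (maxbsz : Int) : List (Int × Int) :=
  if bsz ≤ maxbsz then [((0 : Int), bsz)]
  else if PySem.Int.mod bsz maxbsz = 0 then
    (PySem.List.pyRange 0 bsz maxbsz).map (fun i => (i, i + maxbsz))
  else
    let n := PySem.Int.floordiv (bsz + maxbsz - 1) maxbsz
    ((PySem.List.pyRange 0 n 1).foldl (splitLoopA n) ([], bsz, 0)).1

-- ===== PORT B =====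
def split_bsz_alt (bsz : Int) (maxbsz : Int) : List (Int × Int) :=
  if bsz ≤ maxbsz then [((0 : Int), bsz)]
  else
    let n := PySem.Int.floordiv (bsz + maxbsz - 1) maxbsz
    let base := PySem.Int.floordiv bsz n
    let rem := PySem.Int.mod bsz n
    -- bounds = [i * base + min(i, rem) for i in range(n + 1)]
    let bounds := (PySem.List.pyRange 0 (n + 1) 1).map (fun i => i * base + min i rem)
    -- list(zip(bounds, bounds[1:]))
    bounds.zip (bounds.drop 1)

-- ===== PRECONDITION & SPEC =====
-- Pre_ excludes maxbsz ≤ 0 with bsz > maxbsz: there A raises ZeroDivisionError (maxbsz = 0) or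
-- returns an accidental list produced by floor division on a negative divisor, a corner no caller specifies.
def Pre_split_bsz (bsz : Int) (maxbsz : Int) : Prop := bsz ≤ maxbsz ∨ 1 ≤ maxbsz
instance (bsz : Int) (maxbsz : Int) : Decidable (Pre_split_bsz bsz maxbsz) := by
  unfold Pre_split_bsz; infer_instance

def pvWitness_split_bsz : Int × Int := (7, 3)

def Spec_split_bsz (bsz : Int) (maxbsz : Int) (out : List (Int × Int)) : Prop :=
  out = split_bsz_alt bsz maxbsz
instance (bsz : Int) (maxbsz : Int) (out : List (Int × Int)) : Decidable (Spec_split_bsz bsz maxbsz out) := by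
  unfold Spec_split_bsz; infer_instance

-- ===== CLAIM (what is proved, stated in full; the proofs are below) =====
def Claim_equal_split_bsz : Prop := ∀ (bsz : Int) (maxbsz : Int), Dom_split_bsz bsz maxbsz →
  Pre_split_bsz bsz maxbsz → Spec_split_bsz bsz maxbsz (split_bsz bsz maxbsz)

-- ===== LEMMAS AND PROOFS =====

-- the canonical boundary function both programs realise
def pvBnd (base rem i : Int) : Int := i * base + min i rem

-- A's per-iteration ceiling division equals the closed-form chunk size.
theorem pv_size_eq (kk base r : Int) (hk : 0 < kk) (h0 : 0 ≤ r) (h1 : r < kk) :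
    PySem.Int.floordiv (kk * base + r + kk - 1) kk = base + (if 0 < r then 1 else 0) := by
  split_ifs with hr
  · rw [PySem.Int.floordiv_eq_iff_of_pos hk]
    constructor <;> nlinarith
  · rw [PySem.Int.floordiv_eq_iff_of_pos hk]
    constructor <;> nlinarith

theorem pvBnd_succ (base rem i : Int) :
    pvBnd base rem (i + 1) = pvBnd base rem i + base + (if i < rem then 1 else 0) := by
  unfold pvBnd
  split_ifs with h <;> [skip; skip] <;>
    (rw [show (i + 1) * base = i * base + base by ring]; omega)

-- zipping a boundary list with its own tail pairs adjacent boundaries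
theorem pv_zip_adjacent {α : Type} (g : Nat → α) (k : Nat) :
    (((List.range (k + 1)).map g).zip (((List.range (k + 1)).map g).drop 1))
      = (List.range k).map (fun j => (g j, g (j + 1))) := by
  apply List.ext_getElem
  · simp
  · intro j h1 h2
    simp only [List.getElem_zip, List.getElem_drop, List.getElem_map, List.getElem_range]
    simp at h2
    rw [Nat.add_comm 1 j]

-- A's fold produces the canonically paired boundaries.
theorem pv_foldA (n base rem : Int) (_h0 : 0 ≤ rem) (h1 : rem < n) :
    ∀ (k : Nat) (i : Int), 0 ≤ i → i + k = n → ∀ (acc : List (Int × Int)),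
    ((PySem.List.pyRange i n 1).foldl (splitLoopA n)
        (acc, (n - i) * base + max (rem - i) 0, pvBnd base rem i)).1
      = acc ++ (List.range k).map
          (fun (j : Nat) => (pvBnd base rem (i + (j : Int)), pvBnd base rem (i + (j : Int) + 1))) := by
  intro k
  induction k with
  | zero =>
    intro i hi0 hik acc
    rw [PySem.List.pyRange_one_eq_nil (by omega)]
    simp
  | succ k ih =>
    intro i hi0 hik acc
    have hlt : i < n := by omega
    rw [PySem.List.pyRange_one_cons hlt]
    simp only [List.foldl_cons, splitLoopA]
    have hsz : PySem.Int.floordiv ((n - i) * base + max (rem - i) 0 + n - i - 1) (n - i)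
        = base + (if i < rem then 1 else 0) := by
      have harg : (n - i) * base + max (rem - i) 0 + n - i - 1
          = (n - i) * base + max (rem - i) 0 + (n - i) - 1 := by ring
      rw [harg, pv_size_eq (n - i) base (max (rem - i) 0) (by omega) (by omega) (by omega)]
      congr 1
      by_cases hc : i < rem
      · rw [if_pos hc, if_pos (by omega : (0:Int) < max (rem - i) 0)]
      · rw [if_neg hc, if_neg (by omega : ¬ (0:Int) < max (rem - i) 0)]
    rw [hsz]
    have hstart : pvBnd base rem i + (base + (if i < rem then 1 else 0)) = pvBnd base rem (i + 1) := by
      rw [pvBnd_succ]; ring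
    have hrm : (n - i) * base + max (rem - i) 0 - (base + (if i < rem then 1 else 0))
        = (n - (i + 1)) * base + max (rem - (i + 1)) 0 := by
      by_cases hc : i < rem
      · have e1 : max (rem - i) 0 = rem - i := by omega
        have e2 : max (rem - (i + 1)) 0 = rem - (i + 1) := by omega
        simp only [if_pos hc, e1, e2]; ring
      · have e1 : max (rem - i) 0 = 0 := by omega
        have e2 : max (rem - (i + 1)) 0 = 0 := by omega
        simp only [if_neg hc, e1, e2]; ring
    rw [hstart, hrm]
    rw [ih (i + 1) (by omega) (by omega) (acc ++ [(pvBnd base rem i, pvBnd base rem (i + 1))])]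
    rw [List.range_succ_eq_map, List.map_cons, List.map_map, List.append_assoc,
      List.singleton_append]
    congr 1
    congr 1
    · simp
    · apply List.map_congr_left
      intro j _
      simp only [Function.comp]
      congr 2 <;> push_cast <;> ring

-- ===== VERDICT (by name: the statement is the Claim_ definition above) =====
theorem split_bsz_spec : Claim_equal_split_bsz := by
  intro bsz maxbsz _hdom hpre
  unfold Spec_split_bsz split_bsz split_bsz_alt
  by_cases hle : bsz ≤ maxbsz
  · simp [hle]
  · have hm : 1 ≤ maxbsz := hpre.resolve_left hle
    have hmpos : (0 : Int) < maxbsz := by omega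
    have hblt : maxbsz < bsz := by omega
    simp only [if_neg hle]
    set n := PySem.Int.floordiv (bsz + maxbsz - 1) maxbsz with hn
    have hn2 : 2 ≤ n := by
      rw [hn, PySem.Int.le_floordiv_iff_mul_le hmpos]
      omega
    set base := PySem.Int.floordiv bsz n with hbase
    set rem := PySem.Int.mod bsz n with hremdef
    have hnpos : (0 : Int) < n := by omega
    have hrem0 : 0 ≤ rem := by
      rw [hremdef, PySem.Int.mod_eq_emod_of_pos hnpos]; exact Int.emod_nonneg _ (by omega)
    have hrem1 : rem < n := by
      rw [hremdef, PySem.Int.mod_eq_emod_of_pos hnpos]; exact Int.emod_lt_of_pos _ hnpos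
    have hsum : base * n + rem = bsz := PySem.Int.floordiv_mul_add_mod bsz n
    -- B's side reduces to canonically paired boundaries
    have hBside :
        (((PySem.List.pyRange 0 (n + 1) 1).map (fun i => i * base + min i rem)).zip
          (((PySem.List.pyRange 0 (n + 1) 1).map (fun i => i * base + min i rem)).drop 1))
        = (List.range n.toNat).map
            (fun (j : Nat) => (pvBnd base rem (j : Int), pvBnd base rem ((j : Int) + 1))) := by
      rw [PySem.List.pyRange_one]
      have hcnt : (n + 1 - 0).toNat = n.toNat + 1 := by omega
      rw [hcnt, List.map_map]
      rw [show ((fun i => i * base + min i rem) ∘ fun k : Nat => (0 : Int) + k)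
            = (fun k : Nat => ((k : Int) * base + min (k : Int) rem)) by
          funext j; simp]
      rw [pv_zip_adjacent (fun k : Nat => ((k : Int) * base + min (k : Int) rem)) n.toNat]
      apply List.map_congr_left
      intro j _
      unfold pvBnd
      push_cast
      rfl
    by_cases hdvd : PySem.Int.mod bsz maxbsz = 0
    · -- A's dedicated divisible branch vs the canonical boundaries
      simp only [if_pos hdvd]
      obtain ⟨m, hmm⟩ := (PySem.Int.mod_eq_zero_iff_dvd bsz maxbsz).mp hdvd
      have hnm : n = m := by
        rw [hn, PySem.Int.floordiv_eq_iff_of_pos hmpos]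
        constructor <;> nlinarith
      have hbase' : base = maxbsz := by
        rw [hbase, hnm, PySem.Int.floordiv_eq_iff_of_pos (by omega : (0:Int) < m)]
        constructor <;> nlinarith
      have hrem' : rem = 0 := by
        rw [hremdef, hnm, PySem.Int.mod_eq_zero_iff_dvd]
        exact ⟨maxbsz, by linarith [hmm]⟩
      rw [hBside, hbase', hrem']
      rw [PySem.List.pyRange_of_pos 0 bsz hmpos, if_pos (by omega : (0:Int) < bsz)]
      have hcount : ((bsz - 0 + maxbsz - 1) / maxbsz).toNat = n.toNat := by
        rw [hn, PySem.Int.floordiv_eq_ediv_of_pos hmpos]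
        norm_num
      rw [hcount, List.map_map]
      apply List.map_congr_left
      intro j _
      simp only [Function.comp, Prod.mk.injEq]
      unfold pvBnd
      refine ⟨by rw [show min ((j:Int)) (0:Int) = 0 by omega]; ring, ?_⟩
      rw [show min ((j:Int) + 1) (0:Int) = 0 by omega]; ring
    · simp only [if_neg hdvd]
      rw [hBside]
      have hinit : bsz = (n - 0) * base + max (rem - 0) 0 := by
        have : max (rem - 0) 0 = rem := by omega
        rw [this]; nlinarith [hsum]
      have h00 : (0 : Int) = pvBnd base rem 0 := by unfold pvBnd; omega
      have := pv_foldA n base rem hrem0 hrem1 n.toNat 0 (by omega) (by omega) []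
      rw [← hinit, ← h00] at this
      rw [this]
      simp only [List.nil_append]
      apply List.map_congr_left
      intro j _
      simp only [zero_add]
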